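-- pv_equiv track=rewrite | github.com/Roshini2707/multi_paxos_2PC | main.py | _split_into_phases
-- ===== SOURCE A (Python) =====
-- def _split_into_phases(transactions):
--     phases = []
--     current_phase = {
--         'control': [],
--         'transactions': []
--     }
--
--     for txn in transactions:
--         if txn['type'] in ['FAIL', 'RECOVER']:
--             if current_phase['transactions'] or current_phase['control']:
--                 phases.append(current_phase)
--                 current_phase = {
--                     'control': [],
--                     'transactions': []
--                 }
--             current_phase['control'].append(txn)
--         else:
--             current_phase['transactions'].append(txn)
--
--     if current_phase['transactions'] or current_phase['control']:
--         phases.append(current_phase)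
--
--     return phases
-- ===== SOURCE B (Python) =====
-- def _split_into_phases(transactions):
--     def is_ctrl(t):
--         return t['type'] in ('FAIL', 'RECOVER')
--
--     def first_ctrl(items):
--         return next((i for i, t in enumerate(items) if is_ctrl(t)), len(items))
--
--     def go(items):
--         # items is empty or starts with a control txn
--         if not items:
--             return []
--         k = first_ctrl(items[1:]) + 1
--         return [{'control': [items[0]], 'transactions': items[1:k]}] + go(items[k:])
--
--     k = first_ctrl(transactions)
--     lead = transactions[:k]
--     head = [{'control': [], 'transactions': lead}] if lead else []
--     return head + go(transactions[k:])
-- ===== Notes on version B (the rewrite author's own statement) =====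
-- stated objective: alternative
-- what changed: Replaces A's fused flush-on-boundary accumulator loop with a recursive decomposition: find the first control index, emit the leading non-control slice as a phase, then recursively split the remainder at each control boundary using slices.
import Mathlib
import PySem

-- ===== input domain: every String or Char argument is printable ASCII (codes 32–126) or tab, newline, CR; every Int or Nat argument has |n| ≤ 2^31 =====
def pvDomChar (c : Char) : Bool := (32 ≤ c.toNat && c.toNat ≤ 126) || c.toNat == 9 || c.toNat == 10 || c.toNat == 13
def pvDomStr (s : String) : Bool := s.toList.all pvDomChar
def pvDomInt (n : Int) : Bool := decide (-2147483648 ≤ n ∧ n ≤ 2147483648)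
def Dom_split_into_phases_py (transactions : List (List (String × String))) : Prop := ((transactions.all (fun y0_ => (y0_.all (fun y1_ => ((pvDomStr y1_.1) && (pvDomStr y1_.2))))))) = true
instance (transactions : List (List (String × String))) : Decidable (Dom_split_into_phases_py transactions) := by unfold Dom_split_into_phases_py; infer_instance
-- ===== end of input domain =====

-- B replaces A's fused flush-on-boundary accumulator loop with a recursive split at control
-- boundaries (find first control index, slice, recurse) — an alternative decomposition, same cost.


-- ===== PORT A =====
-- txn['type'] (Pre_ guarantees the key is present; outside Pre_ Python raises KeyError)
def pvTypeA (txn : List (String × String)) : String :=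
  (PySem.Dict.mk txn).getD "type" ""

-- txn['type'] in ['FAIL', 'RECOVER']
def pvIsCtrlA (txn : List (String × String)) : Bool :=
  pvTypeA txn == "FAIL" || pvTypeA txn == "RECOVER"

-- current_phase is the two-key dict {'control': c, 'transactions': tx}, carried as (c, tx);
-- state = (phases, c, tx); one iteration of A's for-loop
def pvStepA (st : List (List (String × List (List (String × String)))) ×
    List (List (String × String)) × List (List (String × String)))
    (txn : List (String × String)) :
    List (List (String × List (List (String × String)))) ×
    List (List (String × String)) × List (List (String × String)) :=
  let (phases, c, tx) := st
  if pvIsCtrlA txn then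
    -- if current_phase['transactions'] or current_phase['control']: flush, fresh phase
    let (phases, c, tx) :=
      if !tx.isEmpty || !c.isEmpty then
        (phases ++ [[("control", c), ("transactions", tx)]],
         ([] : List (List (String × String))), ([] : List (List (String × String))))
      else (phases, c, tx)
    (phases, c ++ [txn], tx)
  else
    (phases, c, tx ++ [txn])

def split_into_phases_py (transactions : List (List (String × String))) :
    List (List (String × List (List (String × String)))) :=
  let st := transactions.foldl pvStepA ([], [], [])
  let (phases, c, tx) := st
  if !tx.isEmpty || !c.isEmpty then phases ++ [[("control", c), ("transactions", tx)]]
  else phases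

-- ===== PORT B =====
def pvTypeB (txn : List (String × String)) : String :=
  (PySem.Dict.mk txn).getD "type" ""

def pvIsCtrlB (txn : List (String × String)) : Bool :=
  pvTypeB txn == "FAIL" || pvTypeB txn == "RECOVER"

-- go(items): items empty or starting with a control txn; slice off one phase, recurse
def pvGoB (items : List (List (String × String))) :
    List (List (String × List (List (String × String)))) :=
  match items with
  | [] => []
  | head :: rest =>
    let k := rest.findIdx pvIsCtrlB
    [("control", [head]), ("transactions", rest.take k)] :: pvGoB (rest.drop k)
termination_by items.length
decreasing_by
  simp only [List.length_drop, List.length_cons]; omega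

def split_into_phases_py_alt (transactions : List (List (String × String))) :
    List (List (String × List (List (String × String)))) :=
  let k := transactions.findIdx pvIsCtrlB
  let lead := transactions.take k
  let head := if !lead.isEmpty then [[("control", ([] : List (List (String × String)))), ("transactions", lead)]] else []
  head ++ pvGoB (transactions.drop k)

-- ===== PRECONDITION & SPEC =====
-- Pre_ excludes exactly the inputs on which Python A raises KeyError: a txn without a 'type' key.
def Pre_split_into_phases_py (transactions : List (List (String × String))) : Prop :=
  (transactions.all (fun txn => (PySem.Dict.mk txn).contains "type")) = true
instance (transactions : List (List (String × String))) : Decidable (Pre_split_into_phases_py transactions) := by unfold Pre_split_into_phases_py; infer_instance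

def pvWitness_split_into_phases_py : (List (List (String × String))) :=
  [[("type", "BUY"), ("amt", "3")], [("type", "FAIL")], [("type", "SELL")]]

def Spec_split_into_phases_py (transactions : List (List (String × String))) (out : List (List (String × List (List (String × String))))) : Prop := out = split_into_phases_py_alt transactions
instance (transactions : List (List (String × String))) (out : List (List (String × List (List (String × String))))) : Decidable (Spec_split_into_phases_py transactions out) := by unfold Spec_split_into_phases_py; infer_instance

-- ===== CLAIM (what is proved, stated in full; the proofs are below) =====
def Claim_equal_split_into_phases_py : Prop := ∀ (transactions : List (List (String × String))), Dom_split_into_phases_py transactions → Pre_split_into_phases_py transactions → Spec_split_into_phases_py transactions (split_into_phases_py transactions)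

-- ===== LEMMAS AND PROOFS =====

theorem pvIsCtrlB_eq_A : pvIsCtrlB = pvIsCtrlA := rfl

-- Loop invariant: flushing A's fold started from an arbitrary state equals the already-emitted
-- phases, then the pending phase extended by the leading non-control run, then B's recursive split.
theorem pvFoldA_eq (ts : List (List (String × String)))
    (phases : List (List (String × List (List (String × String)))))
    (c tx : List (List (String × String))) :
    (let (phases, c, tx) := ts.foldl pvStepA (phases, c, tx)
     if !tx.isEmpty || !c.isEmpty then phases ++ [[("control", c), ("transactions", tx)]]
     else phases) =
    phases ++
      (let k := ts.findIdx pvIsCtrlA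
       let tx' := tx ++ ts.take k
       (if !tx'.isEmpty || !c.isEmpty then [[("control", c), ("transactions", tx')]] else []) ++
         pvGoB (ts.drop k)) := by
  induction ts generalizing phases c tx with
  | nil =>
    simp [pvGoB]
    split <;> simp
  | cons x ts ih =>
    by_cases hx : pvIsCtrlA x = true
    · have hfold : (x :: ts).foldl pvStepA (phases, c, tx) =
        ts.foldl pvStepA
          ((if !tx.isEmpty || !c.isEmpty then
              phases ++ [[("control", c), ("transactions", tx)]] else phases),
            [x], []) := by
        simp only [List.foldl_cons, pvStepA, hx, if_true]
        split <;> simp_all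
      rw [hfold, ih]
      have hk : (x :: ts).findIdx pvIsCtrlA = 0 := by
        simp [List.findIdx_cons, hx]
      rw [hk]
      simp only [List.take_zero, List.drop_zero, List.append_nil]
      rw [pvGoB, ← pvIsCtrlB_eq_A]
      split <;> simp
    · have hx' : pvIsCtrlA x = false := by simpa using hx
      have hfold : (x :: ts).foldl pvStepA (phases, c, tx) =
          ts.foldl pvStepA (phases, c, tx ++ [x]) := by
        simp [List.foldl_cons, pvStepA, hx']
      rw [hfold, ih]
      have hk : (x :: ts).findIdx pvIsCtrlA = ts.findIdx pvIsCtrlA + 1 := by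
        simp [List.findIdx_cons, hx']
      rw [hk]
      simp

-- ===== VERDICT (by name: the statement is the Claim_ definition above) =====
theorem split_into_phases_py_spec : Claim_equal_split_into_phases_py := by
  intro ts _ _
  unfold Spec_split_into_phases_py split_into_phases_py split_into_phases_py_alt
  rw [pvFoldA_eq ts [] [] []]
  rw [← pvIsCtrlB_eq_A]
  simp
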